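-- pv_equiv track=rewrite | github.com/witk44/GuildCardGame | resources/PyCode/GameCode.py | decrypt_game_code
-- ===== SOURCE A (Python) =====
-- code_to_ip = {'Z':"1","Y":"2","X":"3","A":"4","B":"5","C":"6","M":"7","N":"8","O":"9","Q":"0","W":".","P":""}
--
-- def decrypt_game_code(game_code):
--     ip = ""
--     port = ""
--     switch = False
--     game_code = str(game_code).upper()
--     for letter in game_code :
--         if letter in code_to_ip:
--             if letter == 'P':
--                 switch = True
--                 continue
--             if switch:
--                 port += code_to_ip[letter]
--             else:
--                 ip+=code_to_ip[letter]
--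
--     return ip,port
-- ===== SOURCE B (Python) =====
-- code_to_ip = {'Z':"1","Y":"2","X":"3","A":"4","B":"5","C":"6","M":"7","N":"8","O":"9","Q":"0","W":".","P":""}
--
-- def decrypt_game_code(game_code):
--     head, _sep, tail = str(game_code).upper().partition('P')
--     decode = lambda seg: ''.join(code_to_ip.get(c, '') for c in seg)
--     return decode(head), decode(tail)
-- ===== Notes on version B (the rewrite author's own statement) =====
-- stated objective: simpler
-- what changed: Replaces the stateful switch-flag loop with a partition at the first 'P' followed by two stateless dict-lookup joins over the segments.
import Mathlib
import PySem

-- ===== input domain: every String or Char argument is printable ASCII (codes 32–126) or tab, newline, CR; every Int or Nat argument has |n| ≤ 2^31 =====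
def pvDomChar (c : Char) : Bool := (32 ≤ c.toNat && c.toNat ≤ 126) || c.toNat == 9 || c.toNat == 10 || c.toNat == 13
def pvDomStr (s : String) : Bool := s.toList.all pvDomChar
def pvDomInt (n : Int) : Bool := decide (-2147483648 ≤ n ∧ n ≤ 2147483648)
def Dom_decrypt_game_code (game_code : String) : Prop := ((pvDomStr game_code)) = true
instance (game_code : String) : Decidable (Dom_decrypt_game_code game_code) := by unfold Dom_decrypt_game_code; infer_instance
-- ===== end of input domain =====

-- B replaces A's stateful switch-flag loop by a partition at the first 'P' plus two stateless
-- segment decodes (objective: simpler). Return-value equivalence only; neither mutates its argument.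

-- the module-level dict code_to_ip (shared context of both programs); values as List Char
def code_to_ip : PySem.Dict Char (List Char) :=
  PySem.Dict.ofList [('Z', ['1']), ('Y', ['2']), ('X', ['3']), ('A', ['4']), ('B', ['5']),
    ('C', ['6']), ('M', ['7']), ('N', ['8']), ('O', ['9']), ('Q', ['0']), ('W', ['.']), ('P', [])]

-- ===== PORT A =====
-- the for-loop with state (ip, port, switch), branch for branch
def decrypt_game_code_loop (cs : List Char) (st : List Char × List Char × Bool) :
    List Char × List Char × Bool :=
  match cs with
  | [] => st
  | letter :: rest =>
    let st' :=
      match PySem.Dict.get? code_to_ip letter with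
      | none => st
      | some v =>
        if letter = 'P' then (st.1, st.2.1, true)
        else if st.2.2 then (st.1, st.2.1 ++ v, st.2.2)
        else (st.1 ++ v, st.2.1, st.2.2)
    decrypt_game_code_loop rest st'

def decrypt_game_code (game_code : String) : String × String :=
  let s := (PySem.Str.upper game_code).toList
  let r := decrypt_game_code_loop s ([], [], false)
  (String.ofList r.1, String.ofList r.2.1)

-- ===== PORT B =====
-- decode = ''.join(code_to_ip.get(c, '') for c in seg)
def decrypt_decode (seg : List Char) : List Char :=
  seg.flatMap (fun c => (PySem.Dict.get? code_to_ip c).getD [])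

def decrypt_game_code_alt (game_code : String) : String × String :=
  let s := (PySem.Str.upper game_code).toList
  -- str.partition('P'), ported by hand (exact): head = before the first 'P', tail = after it ([] if absent)
  let head := s.takeWhile (· ≠ 'P')
  let tail := (s.dropWhile (· ≠ 'P')).drop 1
  (String.ofList (decrypt_decode head), String.ofList (decrypt_decode tail))

-- ===== PRECONDITION & SPEC =====
def Spec_decrypt_game_code (game_code : String) (out : String × String) : Prop := out = decrypt_game_code_alt game_code
instance (game_code : String) (out : String × String) : Decidable (Spec_decrypt_game_code game_code out) := by unfold Spec_decrypt_game_code; infer_instance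

-- ===== CLAIM (what is proved, stated in full; the proofs are below) =====
def Claim_equal_decrypt_game_code : Prop := ∀ (game_code : String), Dom_decrypt_game_code game_code → Spec_decrypt_game_code game_code (decrypt_game_code game_code)

-- ===== LEMMAS AND PROOFS =====

-- once switch is true, A's loop appends exactly B's decode of the rest to port
theorem decrypt_loop_switched (cs : List Char) (ip port : List Char) :
    decrypt_game_code_loop cs (ip, port, true) = (ip, port ++ decrypt_decode cs, true) := by
  induction cs generalizing port with
  | nil => simp [decrypt_game_code_loop, decrypt_decode]
  | cons c rest ih =>
    have hvP : PySem.Dict.get? code_to_ip 'P' = some [] := by decide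
    by_cases hP : c = 'P'
    · subst hP
      simp [decrypt_game_code_loop, decrypt_decode, hvP, ih]
    · cases hv : PySem.Dict.get? code_to_ip c with
      | none => simp [decrypt_game_code_loop, decrypt_decode, hv, ih]
      | some v => simp [decrypt_game_code_loop, decrypt_decode, hv, hP, ih]

-- before the first 'P', A's loop realises B's partition-then-decode
theorem decrypt_loop_unswitched (cs : List Char) (ip port : List Char) :
    decrypt_game_code_loop cs (ip, port, false) =
      (ip ++ decrypt_decode (cs.takeWhile (· ≠ 'P')),
       port ++ decrypt_decode ((cs.dropWhile (· ≠ 'P')).drop 1),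
       decide ('P' ∈ cs)) := by
  induction cs generalizing ip with
  | nil => simp [decrypt_game_code_loop, decrypt_decode]
  | cons c rest ih =>
    have hvP : PySem.Dict.get? code_to_ip 'P' = some [] := by decide
    by_cases hP : c = 'P'
    · subst hP
      simp [decrypt_game_code_loop, decrypt_decode, hvP, decrypt_loop_switched]
    · cases hv : PySem.Dict.get? code_to_ip c with
      | none =>
        simp [decrypt_game_code_loop, decrypt_decode, hv, hP, ih, List.mem_cons, Ne.symm hP]
      | some v =>
        simp [decrypt_game_code_loop, decrypt_decode, hv, hP, ih, List.mem_cons, Ne.symm hP]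

-- ===== VERDICT (by name: the statement is the Claim_ definition above) =====
theorem decrypt_game_code_spec : Claim_equal_decrypt_game_code := by
  intro game_code _
  show _ = _
  simp [decrypt_game_code, decrypt_game_code_alt, decrypt_loop_unswitched]
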